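-- pv_equiv track=rewrite | github.com/scottmm374/My_Advent_solutions | Advent/2022/Day11MonkeyintheMiddle/main.py | check_monkey_zero
-- ===== SOURCE A (Python) =====
-- def check_monkey_zero(arr_0, arr_1, arr_2, count):
--
--     temp_0 = arr_0
--     temp_3 = arr_1
--     temp_7 = arr_2
--     m_zero = count
--
--     while len(temp_0) > 0:
--         m_zero +=1
--         item = temp_0.pop(0)
--         new = item * 7
--         # rounded = math.floor(new / 3)
--         if new % 3 == 0:
--             temp_3.append(new)
--         else:
--             temp_7.append(new)
--     return(temp_0, temp_3, temp_7, m_zero)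
-- ===== SOURCE B (Python) =====
-- def check_monkey_zero(arr_0, arr_1, arr_2, count):
--     vals = [x * 7 for x in arr_0]
--     m_zero = count + len(arr_0)
--     arr_1.extend(v for v in vals if v % 3 == 0)
--     arr_2.extend(v for v in vals if v % 3 != 0)
--     arr_0.clear()
--     return (arr_0, arr_1, arr_2, m_zero)
-- ===== Notes on version B (the rewrite author's own statement) =====
-- stated objective: faster
-- what changed: Replaced the destructive pop(0) while-loop that interleaves counting and dispatch with a closed-form counter plus one mapped list and two filtered extends, then a single clear of the source list.
import Mathlib
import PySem

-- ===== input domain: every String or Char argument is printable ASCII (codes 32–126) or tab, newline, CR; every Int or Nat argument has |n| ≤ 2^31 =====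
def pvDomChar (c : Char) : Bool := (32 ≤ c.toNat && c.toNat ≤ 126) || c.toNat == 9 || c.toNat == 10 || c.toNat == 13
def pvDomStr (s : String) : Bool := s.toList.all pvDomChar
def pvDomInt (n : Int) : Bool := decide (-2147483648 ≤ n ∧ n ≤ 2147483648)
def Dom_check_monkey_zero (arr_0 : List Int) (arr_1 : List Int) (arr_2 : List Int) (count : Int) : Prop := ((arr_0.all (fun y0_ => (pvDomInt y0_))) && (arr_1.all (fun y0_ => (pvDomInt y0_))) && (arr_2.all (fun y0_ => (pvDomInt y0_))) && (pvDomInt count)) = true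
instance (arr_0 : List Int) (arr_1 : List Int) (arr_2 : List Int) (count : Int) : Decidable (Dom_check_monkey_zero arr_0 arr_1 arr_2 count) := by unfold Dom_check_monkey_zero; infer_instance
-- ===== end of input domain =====

-- ===== PORT A =====
-- B: closed-form counter + two filtered passes instead of A's pop(0) while-loop; return value only (A/B also mutate the list arguments in place).
def check_monkey_zero_loop (temp_0 temp_3 temp_7 : List Int) (m_zero : Int) : List Int × List Int × List Int × Int :=
  match temp_0 with
  | [] => (temp_0, temp_3, temp_7, m_zero)
  | item :: rest =>
    let new := item * 7
    if PySem.Int.mod new 3 == 0 then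
      check_monkey_zero_loop rest (temp_3 ++ [new]) temp_7 (m_zero + 1)
    else
      check_monkey_zero_loop rest temp_3 (temp_7 ++ [new]) (m_zero + 1)

def check_monkey_zero (arr_0 : List Int) (arr_1 : List Int) (arr_2 : List Int) (count : Int) : List Int × List Int × List Int × Int :=
  check_monkey_zero_loop arr_0 arr_1 arr_2 count

-- ===== PORT B =====
def check_monkey_zero_alt (arr_0 : List Int) (arr_1 : List Int) (arr_2 : List Int) (count : Int) : List Int × List Int × List Int × Int :=
  let vals := arr_0.map (fun x => x * 7)
  let m_zero := count + arr_0.length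
  let a1 := arr_1 ++ vals.filter (fun v => PySem.Int.mod v 3 == 0)
  let a2 := arr_2 ++ vals.filter (fun v => !(PySem.Int.mod v 3 == 0))
  ([], a1, a2, m_zero)

-- ===== PRECONDITION & SPEC =====
def Spec_check_monkey_zero (arr_0 : List Int) (arr_1 : List Int) (arr_2 : List Int) (count : Int) (out : List Int × List Int × List Int × Int) : Prop := out = check_monkey_zero_alt arr_0 arr_1 arr_2 count
instance (arr_0 : List Int) (arr_1 : List Int) (arr_2 : List Int) (count : Int) (out : List Int × List Int × List Int × Int) : Decidable (Spec_check_monkey_zero arr_0 arr_1 arr_2 count out) := by unfold Spec_check_monkey_zero; infer_instance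

-- ===== CLAIM (what is proved, stated in full; the proofs are below) =====
def Claim_equal_check_monkey_zero : Prop := ∀ (arr_0 : List Int) (arr_1 : List Int) (arr_2 : List Int) (count : Int), Dom_check_monkey_zero arr_0 arr_1 arr_2 count → Spec_check_monkey_zero arr_0 arr_1 arr_2 count (check_monkey_zero arr_0 arr_1 arr_2 count)

-- ===== LEMMAS AND PROOFS =====

-- ===== VERDICT (by name: the statement is the Claim_ definition above) =====
theorem check_monkey_zero_loop_eq (temp_0 : List Int) : ∀ (temp_3 temp_7 : List Int) (m : Int),
    check_monkey_zero_loop temp_0 temp_3 temp_7 m =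
      ([], temp_3 ++ (temp_0.map (fun x => x * 7)).filter (fun v => PySem.Int.mod v 3 == 0),
           temp_7 ++ (temp_0.map (fun x => x * 7)).filter (fun v => !(PySem.Int.mod v 3 == 0)),
           m + temp_0.length) := by
  induction temp_0 with
  | nil => intro t3 t7 m; simp [check_monkey_zero_loop]
  | cons x rest ih =>
    intro t3 t7 m
    by_cases h : (x * 7) % 3 = 0 <;>
      simp [check_monkey_zero_loop, h, ih, List.append_assoc] <;> omega

theorem check_monkey_zero_spec : Claim_equal_check_monkey_zero := by
  intro arr_0 arr_1 arr_2 count _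
  unfold Spec_check_monkey_zero check_monkey_zero check_monkey_zero_alt
  simp [check_monkey_zero_loop_eq]
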